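-- pv_equiv track=rewrite | github.com/SakuraBlssm/EliteCybersecurityUnit | MrRileysEncryptionAlgos/main.py | rileySuperSecretEncrypt03
-- ===== SOURCE A (Python) =====
-- def rileySuperSecretEncrypt03(someWord):
--     if len(someWord) >= 16:
--         return someWord
--     substitutions = {"a":"ee", "e":"ii", "i":"oo", "o":"uu", "u":"aa", "r":"ss", "s":"tt", "t":"ss"}
--     result = "*"
--     for eachLetter in someWord:
--         if eachLetter in substitutions:
--             result += substitutions[eachLetter]
--         else:
--             result += eachLetter
--     return rileySuperSecretEncrypt03(result) + "*"
-- ===== SOURCE B (Python) =====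
-- def rileySuperSecretEncrypt03(someWord):
--     substitutions = {"a":"ee", "e":"ii", "i":"oo", "o":"uu", "u":"aa", "r":"ss", "s":"tt", "t":"ss"}
--     cur = someWord
--     stars = 0
--     while len(cur) < 16:
--         cur = "*" + "".join(substitutions.get(c, c) for c in cur)
--         stars += 1
--     return cur + "*" * stars
-- ===== Notes on version B (the rewrite author's own statement) =====
-- stated objective: simpler
-- what changed: Replaces the self-recursion (one leading '*' inside substitution and one trailing '*' per return) with an explicit while loop that rebuilds the string via join and a counter of trailing stars appended once at the end.
import Mathlib
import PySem

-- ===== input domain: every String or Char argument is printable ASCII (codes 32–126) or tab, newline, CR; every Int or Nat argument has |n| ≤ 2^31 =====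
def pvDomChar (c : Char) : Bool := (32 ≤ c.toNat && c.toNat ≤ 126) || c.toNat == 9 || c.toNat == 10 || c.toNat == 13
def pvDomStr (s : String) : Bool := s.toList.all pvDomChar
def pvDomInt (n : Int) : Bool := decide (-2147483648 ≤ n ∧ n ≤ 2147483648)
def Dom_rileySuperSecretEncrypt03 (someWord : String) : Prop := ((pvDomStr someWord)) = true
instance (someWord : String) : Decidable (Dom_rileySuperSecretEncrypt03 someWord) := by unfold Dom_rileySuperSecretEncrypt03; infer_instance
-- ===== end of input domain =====

-- B replaces A's self-recursion by an explicit while loop with a counter of trailing stars; same value, simpler control flow (objective: simpler, not faster).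

-- The substitution dict (shared literal constant of both Pythons)
def pvSubs : PySem.Dict Char (List Char) :=
  PySem.Dict.ofList [('a', ['e','e']), ('e', ['i','i']), ('i', ['o','o']), ('o', ['u','u']),
                     ('u', ['a','a']), ('r', ['s','s']), ('s', ['t','t']), ('t', ['s','s'])]

-- ===== PORT A =====
-- A's loop body: result = "*"; for c in someWord: result += subs[c] if c in subs else c
def pvStepA (l : List Char) : List Char :=
  l.foldl (fun acc c => if pvSubs.contains c then acc ++ pvSubs.getD c [] else acc ++ [c]) ['*']

-- every value of pvSubs has length 2; needed only for termination of the ports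
theorem pvSubs_get?_len (c : Char) (r : List Char) (h : pvSubs.get? c = some r) : r.length = 2 := by
  have hm := PySem.Dict.mem_items_of_get?_eq_some pvSubs h
  have hi : pvSubs.items = [('a', ['e','e']), ('e', ['i','i']), ('i', ['o','o']), ('o', ['u','u']),
                     ('u', ['a','a']), ('r', ['s','s']), ('s', ['t','t']), ('t', ['s','s'])] := by decide
  rw [hi] at hm
  simp only [List.mem_cons, List.not_mem_nil, or_false, Prod.mk.injEq] at hm
  rcases hm with ⟨_, h⟩|⟨_, h⟩|⟨_, h⟩|⟨_, h⟩|⟨_, h⟩|⟨_, h⟩|⟨_, h⟩|⟨_, h⟩ <;> subst h <;> rfl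

theorem pvStepA_len (l : List Char) : l.length + 1 ≤ (pvStepA l).length := by
  unfold pvStepA
  suffices h : ∀ init : List Char,
      init.length + l.length ≤
        (l.foldl (fun acc c => if pvSubs.contains c then acc ++ pvSubs.getD c [] else acc ++ [c]) init).length by
    have := h ['*']; simpa [Nat.add_comm] using this
  induction l with
  | nil => intro init; simp
  | cons c t ih =>
    intro init
    have h1 : init.length + 1 ≤
        (if pvSubs.contains c then init ++ pvSubs.getD c [] else init ++ [c]).length := by
      by_cases hc : pvSubs.contains c
      · have hs : (pvSubs.get? c).isSome := by rw [← PySem.Dict.contains_eq_isSome_get?, hc]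
        rcases Option.isSome_iff_exists.mp hs with ⟨r, hr⟩
        have := pvSubs_get?_len c r hr
        simp [hc, PySem.Dict.getD_of_get?_eq_some pvSubs _ hr, this]
      · simp [hc]
    have := ih (if pvSubs.contains c then init ++ pvSubs.getD c [] else init ++ [c])
    simp only [List.foldl_cons, List.length_cons]
    omega

def rileyCoreA (l : List Char) : List Char :=
  if 16 ≤ l.length then l
  else rileyCoreA (pvStepA l) ++ ['*']
termination_by 16 - l.length
decreasing_by have := pvStepA_len l; omega

def rileySuperSecretEncrypt03 (someWord : String) : String :=
  String.ofList (rileyCoreA someWord.toList)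

-- ===== PORT B =====
-- B's loop body: cur = "*" + "".join(subs.get(c, c) for c in cur)
def pvStepB (l : List Char) : List Char :=
  '*' :: l.flatMap (fun c => pvSubs.getD c [c])

theorem pvStepB_len (l : List Char) : l.length + 1 ≤ (pvStepB l).length := by
  unfold pvStepB
  simp only [List.length_cons, List.length_flatMap, Nat.add_le_add_iff_right]
  calc l.length = (l.map (fun _ => 1)).sum := by simp
    _ ≤ _ := by
        apply List.sum_le_sum
        intro c _
        cases hr : pvSubs.get? c with
        | none => simp [PySem.Dict.getD_of_get?_eq_none pvSubs [c] hr]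
        | some r =>
          have := pvSubs_get?_len c r hr
          simp [PySem.Dict.getD_of_get?_eq_some pvSubs _ hr, this]

-- while len(cur) < 16: cur = step(cur); stars += 1
def rileyLoopB (cur : List Char) (stars : Nat) : List Char × Nat :=
  if cur.length < 16 then rileyLoopB (pvStepB cur) (stars + 1) else (cur, stars)
termination_by 16 - cur.length
decreasing_by have := pvStepB_len cur; omega

def rileySuperSecretEncrypt03_alt (someWord : String) : String :=
  let p := rileyLoopB someWord.toList 0
  String.ofList (p.1 ++ List.replicate p.2 '*')

-- ===== PRECONDITION & SPEC =====
def Spec_rileySuperSecretEncrypt03 (someWord : String) (out : String) : Prop := out = rileySuperSecretEncrypt03_alt someWord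
instance (someWord : String) (out : String) : Decidable (Spec_rileySuperSecretEncrypt03 someWord out) := by unfold Spec_rileySuperSecretEncrypt03; infer_instance

-- ===== CLAIM (what is proved, stated in full; the proofs are below) =====
def Claim_equal_rileySuperSecretEncrypt03 : Prop := ∀ (someWord : String), Dom_rileySuperSecretEncrypt03 someWord → Spec_rileySuperSecretEncrypt03 someWord (rileySuperSecretEncrypt03 someWord)

-- ===== LEMMAS AND PROOFS =====

-- A's accumulator loop computes "*" ++ the per-letter substitution of l, i.e. B's step
theorem pvStep_eq (l : List Char) : pvStepA l = pvStepB l := by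
  unfold pvStepA pvStepB
  have hfun : ∀ (acc : List Char) (c : Char),
      (if pvSubs.contains c then acc ++ pvSubs.getD c [] else acc ++ [c]) =
        acc ++ pvSubs.getD c [c] := by
    intro acc c
    by_cases hc : pvSubs.contains c
    · have hs : (pvSubs.get? c).isSome := by rw [← PySem.Dict.contains_eq_isSome_get?, hc]
      rcases Option.isSome_iff_exists.mp hs with ⟨r, hr⟩
      rw [PySem.Dict.getD_of_get?_eq_some pvSubs [] hr, PySem.Dict.getD_of_get?_eq_some pvSubs [c] hr]
      simp [hc]
    · simp [hc, PySem.Dict.getD_of_not_contains pvSubs [c] (by simpa using hc)]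
  have hf : (fun (acc : List Char) (c : Char) => if pvSubs.contains c then acc ++ pvSubs.getD c [] else acc ++ [c]) =
      (fun acc c => acc ++ pvSubs.getD c [c]) := by
    funext acc c; exact hfun acc c
  rw [hf, PySem.List.foldl_append_eq_flatMap]
  rfl

-- loop invariant: the loop's result plus its accumulated stars equals A's recursion plus the stars pending so far
theorem rileyLoop_eq (n : Nat) : ∀ (l : List Char) (s : Nat), 16 - l.length ≤ n →
    (rileyLoopB l s).1 ++ List.replicate (rileyLoopB l s).2 '*' = rileyCoreA l ++ List.replicate s '*' := by
  induction n with
  | zero =>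
    intro l s h
    have hl : 16 ≤ l.length := by omega
    rw [rileyLoopB, rileyCoreA]
    simp [Nat.not_lt.mpr hl, hl]
  | succ n ih =>
    intro l s h
    rw [rileyLoopB, rileyCoreA]
    by_cases hl : l.length < 16
    · simp only [hl, if_pos, Nat.not_le.mpr hl, if_false]
      have hlen := pvStepB_len l
      have := ih (pvStepB l) (s + 1) (by omega)
      rw [this, pvStep_eq]
      simp [List.replicate_succ, List.append_assoc]
    · have hl' : 16 ≤ l.length := Nat.not_lt.mp hl
      simp [hl, hl']

-- ===== VERDICT (by name: the statement is the Claim_ definition above) =====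
theorem rileySuperSecretEncrypt03_spec : Claim_equal_rileySuperSecretEncrypt03 := by
  intro someWord _
  unfold Spec_rileySuperSecretEncrypt03 rileySuperSecretEncrypt03 rileySuperSecretEncrypt03_alt
  have := rileyLoop_eq (16 - someWord.toList.length) someWord.toList 0 (le_refl _)
  simp only [List.replicate_zero, List.append_nil] at this
  rw [← this]
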